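-- pv_equiv track=rewrite | github.com/Quiq/influxdb-tools | line-protocol-to-clickhouse.py | filter_measurements
-- ===== SOURCE A (Python) =====
-- def filter_measurements(measurements, from_measurement, ignore_measurements):
--     """Filter the list of measurements."""
--     if ignore_measurements:
--         new_list = []
--         for m in measurements:
--             if m not in ignore_measurements:
--                 new_list.append(m)
--
--         measurements = new_list
--
--     i = 0
--     for m in measurements:
--         if m == from_measurement:
--             return measurements[i:]
--
--         i += 1
--
--     # Return nothing if from_measurement was given and not matched above.
--     if from_measurement:
--         return []
--
--     return measurements
-- ===== SOURCE B (Python) =====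
-- def filter_measurements(measurements, from_measurement, ignore_measurements):
--     """Filter the list of measurements (single pass)."""
--     result = []
--     start = None
--     for m in measurements:
--         if ignore_measurements and m in ignore_measurements:
--             continue
--         if start is None and m == from_measurement:
--             start = len(result)
--         result.append(m)
--     if start is not None:
--         return result[start:]
--     return [] if from_measurement else result
-- ===== Notes on version B (the rewrite author's own statement) =====
-- stated objective: simpler
-- what changed: Merged A's two sequential passes (build filtered list, then scan it for the match index) into one loop over the input that skips ignored elements and records the suffix start at the first match.
import Mathlib
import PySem

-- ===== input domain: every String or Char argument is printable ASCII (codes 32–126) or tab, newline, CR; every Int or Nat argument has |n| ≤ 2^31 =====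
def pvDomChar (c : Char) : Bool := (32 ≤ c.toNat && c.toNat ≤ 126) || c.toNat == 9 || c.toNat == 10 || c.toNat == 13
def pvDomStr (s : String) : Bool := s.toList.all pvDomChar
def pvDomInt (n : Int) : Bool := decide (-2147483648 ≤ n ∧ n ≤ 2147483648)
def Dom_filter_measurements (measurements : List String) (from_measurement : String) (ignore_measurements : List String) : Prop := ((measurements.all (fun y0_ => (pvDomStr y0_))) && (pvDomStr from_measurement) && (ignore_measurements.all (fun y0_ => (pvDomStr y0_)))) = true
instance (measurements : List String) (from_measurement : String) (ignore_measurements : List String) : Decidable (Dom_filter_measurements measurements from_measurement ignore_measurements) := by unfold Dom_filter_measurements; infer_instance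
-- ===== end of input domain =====

-- B merges A's two sequential passes into a single loop that skips ignored
-- measurements and records the suffix start at the first match (objective: simpler).

-- ===== PORT A =====
-- the 'if ignore_measurements:' filtering loop (appends kept elements to new_list)
def pvAFilterLoop (measurements : List String) (ignore_measurements : List String) : List String :=
  measurements.foldl (fun new_list m => if ignore_measurements.contains m then new_list else new_list ++ [m]) []

-- the search loop: i counts, on match returns measurements[i:]; after the loop the
-- post-loop returns ([] if from_measurement else measurements)
def pvASearch (ms : List String) (all : List String) (i : Nat) (from_measurement : String) : List String :=
  match ms with
  | [] => if from_measurement = "" then all else []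
  | m :: rest => if m = from_measurement then all.drop i else pvASearch rest all (i + 1) from_measurement

def filter_measurements (measurements : List String) (from_measurement : String) (ignore_measurements : List String) : List String :=
  let measurements' := if ignore_measurements.isEmpty then measurements else pvAFilterLoop measurements ignore_measurements
  pvASearch measurements' measurements' 0 from_measurement

-- ===== PORT B =====
-- B's single loop: carries (result, start); skips ignored elements, records
-- start = len(result) at the first element equal to from_measurement
def pvBLoop (ms : List String) (from_measurement : String) (ignore_measurements : List String)
    (result : List String) (start : Option Nat) : List String × Option Nat :=
  match ms with
  | [] => (result, start)
  | m :: rest =>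
    if !ignore_measurements.isEmpty && ignore_measurements.contains m then
      pvBLoop rest from_measurement ignore_measurements result start
    else
      let start' := if start.isNone && m == from_measurement then some result.length else start
      pvBLoop rest from_measurement ignore_measurements (result ++ [m]) start'

def filter_measurements_alt (measurements : List String) (from_measurement : String) (ignore_measurements : List String) : List String :=
  let p := pvBLoop measurements from_measurement ignore_measurements [] none
  match p.2 with
  | some s => p.1.drop s
  | none => if from_measurement = "" then p.1 else []

-- ===== PRECONDITION & SPEC =====
def Spec_filter_measurements (measurements : List String) (from_measurement : String) (ignore_measurements : List String) (out : List String) : Prop := out = filter_measurements_alt measurements from_measurement ignore_measurements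
instance (measurements : List String) (from_measurement : String) (ignore_measurements : List String) (out : List String) : Decidable (Spec_filter_measurements measurements from_measurement ignore_measurements out) := by unfold Spec_filter_measurements; infer_instance

-- ===== CLAIM (what is proved, stated in full; the proofs are below) =====
def Claim_equal_filter_measurements : Prop := ∀ (measurements : List String) (from_measurement : String) (ignore_measurements : List String), Dom_filter_measurements measurements from_measurement ignore_measurements → Spec_filter_measurements measurements from_measurement ignore_measurements (filter_measurements measurements from_measurement ignore_measurements)

-- ===== LEMMAS AND PROOFS =====

-- A's filtering loop is List.filter
theorem pvAFilterLoop_eq (ig : List String) : ∀ (ms acc : List String),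
    ms.foldl (fun new_list m => if ig.contains m then new_list else new_list ++ [m]) acc
      = acc ++ ms.filter (fun m => !ig.contains m) := by
  intro ms
  induction ms with
  | nil => simp
  | cons m rest ih =>
    intro acc
    rw [List.foldl_cons, ih, List.filter_cons]
    by_cases h : m ∈ ig <;> simp [h]

-- B's loop over the raw input equals the skip-free loop over the filtered list
def pvBLoopF (ms : List String) (from_measurement : String)
    (result : List String) (start : Option Nat) : List String × Option Nat :=
  match ms with
  | [] => (result, start)
  | m :: rest =>
    let start' := if start.isNone && m == from_measurement then some result.length else start
    pvBLoopF rest from_measurement (result ++ [m]) start'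

theorem pvBLoop_eq_F (f : String) (ig : List String) : ∀ (ms res : List String) (st : Option Nat),
    pvBLoop ms f ig res st
      = pvBLoopF (ms.filter (fun m => !(!ig.isEmpty && ig.contains m))) f res st := by
  intro ms
  induction ms with
  | nil => intro res st; simp [pvBLoop, pvBLoopF]
  | cons m rest ih =>
    intro res st
    simp only [pvBLoop, List.filter_cons]
    by_cases h : (!ig.isEmpty && ig.contains m) = true
    · rw [if_pos h, ih, if_neg (by rw [h]; simp)]
    · rw [if_neg h, ih]
      have hc : (!(!ig.isEmpty && ig.contains m)) = true := by
        simp only [Bool.not_eq_true] at h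
        rw [h]
        rfl
      rw [if_pos hc]
      rfl

-- once start is set, the loop only accumulates
theorem pvBLoopF_some (f : String) (s : Nat) : ∀ (ms res : List String),
    pvBLoopF ms f res (some s) = (res ++ ms, some s) := by
  intro ms
  induction ms with
  | nil => intro res; simp [pvBLoopF]
  | cons m rest ih => intro res; simp [pvBLoopF, ih]

def pvBPost (f : String) (p : List String × Option Nat) : List String :=
  match p.2 with
  | some s => p.1.drop s
  | none => if f = "" then p.1 else []

-- main connection: B's loop + post-processing computes A's search over the same list
theorem pvB_eq_search (f : String) : ∀ (sub acc : List String),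
    pvBPost f (pvBLoopF sub f acc none) = pvASearch sub (acc ++ sub) acc.length f := by
  intro sub
  induction sub with
  | nil => intro acc; simp [pvBLoopF, pvBPost, pvASearch]
  | cons m rest ih =>
    intro acc
    by_cases h : m = f
    · simp [pvBLoopF, pvASearch, h, pvBLoopF_some, pvBPost, List.append_assoc]
    · have hne : (m == f) = false := by simp [h]
      simp only [pvBLoopF, pvASearch, hne, Option.isNone_none, Bool.true_and, if_neg h,
        Bool.false_eq_true, if_false, ih (acc ++ [m])]
      simp [List.append_assoc]

-- the two filtered lists coincide
theorem pvFiltered_eq (ms ig : List String) :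
    (if ig.isEmpty then ms else pvAFilterLoop ms ig)
      = ms.filter (fun m => !(!ig.isEmpty && ig.contains m)) := by
  by_cases h : ig.isEmpty = true
  · simp [h]
  · have h' : ig.isEmpty = false := eq_false_of_ne_true h
    rw [if_neg h, pvAFilterLoop, pvAFilterLoop_eq, List.nil_append]
    simp [h']

-- ===== VERDICT (by name: the statement is the Claim_ definition above) =====
theorem filter_measurements_spec : Claim_equal_filter_measurements := by
  intro ms f ig _
  show filter_measurements ms f ig = filter_measurements_alt ms f ig
  unfold filter_measurements filter_measurements_alt
  rw [pvBLoop_eq_F, pvFiltered_eq]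
  have h := pvB_eq_search f (ms.filter (fun m => !(!ig.isEmpty && ig.contains m))) []
  simp only [List.nil_append, List.length_nil] at h
  exact h.symm
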